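-- pv_equiv track=rewrite | github.com/KosmicznaBarta/Python-BK | Statki/RandomPlacement.py | rotate_coordinates
-- ===== SOURCE A (Python) =====
-- def rotate_coordinates(coordinates, angle):
--     if angle == 0:
--         return coordinates
--     elif angle == 90:
--         return [(y, -x) for x, y in coordinates]
--     elif angle == 180:
--         return [(-x, -y) for x, y in coordinates]
--     elif angle == 270:
--         return [(-y, x) for x, y in coordinates]
-- ===== SOURCE B (Python) =====
-- def rotate_coordinates(coordinates, angle):
--     if angle == 0:
--         return coordinates
--     if angle not in (90, 180, 270):
--         return None
--     result = coordinates
--     for _ in range(angle // 90):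
--         result = [(y, -x) for x, y in result]
--     return result
-- ===== Notes on version B (the rewrite author's own statement) =====
-- stated objective: alternative
-- what changed: B replaces the three hard-coded closed forms by repeated application of the single 90-degree rotation, looping angle//90 times over one base transform.
import Mathlib
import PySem

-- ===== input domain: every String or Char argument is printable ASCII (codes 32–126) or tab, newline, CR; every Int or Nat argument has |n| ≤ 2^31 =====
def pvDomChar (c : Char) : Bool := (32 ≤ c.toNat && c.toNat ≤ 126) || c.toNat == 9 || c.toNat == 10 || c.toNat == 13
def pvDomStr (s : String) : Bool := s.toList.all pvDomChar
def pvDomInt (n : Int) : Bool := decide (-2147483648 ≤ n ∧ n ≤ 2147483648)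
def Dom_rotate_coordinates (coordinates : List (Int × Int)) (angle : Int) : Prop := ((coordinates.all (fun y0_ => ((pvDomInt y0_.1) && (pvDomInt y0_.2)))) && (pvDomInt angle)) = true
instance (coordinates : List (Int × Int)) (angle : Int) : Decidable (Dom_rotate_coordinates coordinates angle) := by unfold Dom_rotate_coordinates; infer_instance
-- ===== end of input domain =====

-- B replaces the three hard-coded closed forms by looping the single 90-degree rotation angle//90 times (alternative decomposition, same cost).


-- ===== PORT A =====
def rotate_coordinates (coordinates : List (Int × Int)) (angle : Int) : Option (List (Int × Int)) :=
  if angle = 0 then some coordinates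
  else if angle = 90 then some (coordinates.map (fun p => (p.2, -p.1)))
  else if angle = 180 then some (coordinates.map (fun p => (-p.1, -p.2)))
  else if angle = 270 then some (coordinates.map (fun p => (-p.2, p.1)))
  else none

-- ===== PORT B =====
def rotate_coordinates_alt (coordinates : List (Int × Int)) (angle : Int) : Option (List (Int × Int)) :=
  if angle = 0 then some coordinates
  else if ¬ (angle = 90 ∨ angle = 180 ∨ angle = 270) then none
  else
    some ((PySem.List.pyRange 0 (PySem.Int.floordiv angle 90) 1).foldl
      (fun result _ => result.map (fun p => (p.2, -p.1))) coordinates)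

-- ===== PRECONDITION & SPEC =====
def Spec_rotate_coordinates (coordinates : List (Int × Int)) (angle : Int) (out : Option (List (Int × Int))) : Prop := out = rotate_coordinates_alt coordinates angle
instance (coordinates : List (Int × Int)) (angle : Int) (out : Option (List (Int × Int))) : Decidable (Spec_rotate_coordinates coordinates angle out) := by unfold Spec_rotate_coordinates; infer_instance

-- ===== CLAIM (what is proved, stated in full; the proofs are below) =====
def Claim_equal_rotate_coordinates : Prop := ∀ (coordinates : List (Int × Int)) (angle : Int), Dom_rotate_coordinates coordinates angle → Spec_rotate_coordinates coordinates angle (rotate_coordinates coordinates angle)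

-- ===== LEMMAS AND PROOFS =====
theorem pyRange_1 : PySem.List.pyRange 0 1 = [0] := by decide
theorem pyRange_2 : PySem.List.pyRange 0 2 = [0, 1] := by decide
theorem pyRange_3 : PySem.List.pyRange 0 3 = [0, 1, 2] := by decide

-- ===== VERDICT (by name: the statement is the Claim_ definition above) =====
theorem rotate_coordinates_spec : Claim_equal_rotate_coordinates := by
  intro coordinates angle _
  unfold Spec_rotate_coordinates rotate_coordinates rotate_coordinates_alt
  by_cases h0 : angle = 0
  · simp [h0]
  · by_cases h90 : angle = 90
    · simp [h90, pyRange_1]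
    · by_cases h180 : angle = 180
      · simp [h180, pyRange_2, List.map_map, Function.comp]
      · by_cases h270 : angle = 270
        · simp [h270, pyRange_3, List.map_map, Function.comp]
        · simp [h0, h90, h180, h270]
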